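-- pv_equiv track=rewrite | github.com/vitorararuna/tag3_unb | grafo.py | verifica_coluna
-- ===== SOURCE A (Python) =====
-- COLUNAS = {
--     0: [0,9,18,27,36,45,54,63,72],
--     1: [1,10,19,28,37,46,55,64,73],
--     2: [2,11,20,29,38,47,56,65,74],
--     3: [3,12,21,30,39,48,57,66,75],
--     4: [4,13,22,31,40,49,58,67,76],
--     5: [5,14,23,32,41,50,59,68,77],
--     6: [6,15,24,33,42,51,60,69,78],
--     7: [7,16,25,34,43,52,61,70,79],
--     8: [8,17,26,35,44,53,62,71,80],
-- }
--
-- def verifica_coluna(i, j):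
--     count = 0
--     for l in COLUNAS:
--         for nmr in COLUNAS[l]:
--             if nmr == i or nmr == j: count +=1
--         if count == 2: return(True)
--         count = 0
--     return False
-- ===== SOURCE B (Python) =====
-- def verifica_coluna(i, j):
--     return i != j and 0 <= i <= 80 and 0 <= j <= 80 and i % 9 == j % 9
-- ===== Notes on version B (the rewrite author's own statement) =====
-- stated objective: simpler
-- what changed: Replaced the scan over the 9 hard-coded column lists (81 comparisons with an early-exit counter) with a closed-form modular check: distinct, both in 0..80, same residue mod 9.
import Mathlib
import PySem

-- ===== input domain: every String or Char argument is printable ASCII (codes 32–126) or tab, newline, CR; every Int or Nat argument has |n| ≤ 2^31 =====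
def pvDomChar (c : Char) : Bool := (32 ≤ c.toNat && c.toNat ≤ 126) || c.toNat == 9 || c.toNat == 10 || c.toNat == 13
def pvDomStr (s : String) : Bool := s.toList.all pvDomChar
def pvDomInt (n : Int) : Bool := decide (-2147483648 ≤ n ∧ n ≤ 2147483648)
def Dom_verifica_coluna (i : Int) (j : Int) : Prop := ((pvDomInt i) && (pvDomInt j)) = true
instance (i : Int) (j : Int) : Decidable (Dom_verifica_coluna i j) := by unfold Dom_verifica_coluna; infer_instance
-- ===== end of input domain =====

-- B replaces A's scan over the 9 hard-coded column lists with a closed-form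
-- modular check (distinct, both in 0..80, same residue mod 9): simpler.

-- ===== PORT A =====
-- the module-level dict COLUNAS, as an association list in insertion order
def COLUNAS : List (Int × List Int) :=
  [(0, [0, 9, 18, 27, 36, 45, 54, 63, 72]), (1, [1, 10, 19, 28, 37, 46, 55, 64, 73]),
   (2, [2, 11, 20, 29, 38, 47, 56, 65, 74]), (3, [3, 12, 21, 30, 39, 48, 57, 66, 75]),
   (4, [4, 13, 22, 31, 40, 49, 58, 67, 76]), (5, [5, 14, 23, 32, 41, 50, 59, 68, 77]),
   (6, [6, 15, 24, 33, 42, 51, 60, 69, 78]), (7, [7, 16, 25, 34, 43, 52, 61, 70, 79]),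
   (8, [8, 17, 26, 35, 44, 53, 62, 71, 80])]

-- the 'for l in COLUNAS' loop with its early 'return True'; the inner 'for nmr'
-- loop is the foldl accumulating count; count restarts at 0 each iteration
-- (faithful: A resets count to 0 after checking it)
def vcLoop (i : Int) (j : Int) : List (Int × List Int) → Bool
  | [] => false
  | (_, col) :: rest =>
      let count : Int := col.foldl (fun c nmr => if nmr = i ∨ nmr = j then c + 1 else c) 0
      if count = 2 then true else vcLoop i j rest

def verifica_coluna (i : Int) (j : Int) : Bool := vcLoop i j COLUNAS

-- ===== PORT B =====
def verifica_coluna_alt (i : Int) (j : Int) : Bool :=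
  decide (i ≠ j ∧ 0 ≤ i ∧ i ≤ 80 ∧ 0 ≤ j ∧ j ≤ 80 ∧ PySem.Int.mod i 9 = PySem.Int.mod j 9)

-- ===== PRECONDITION & SPEC =====
def Spec_verifica_coluna (i : Int) (j : Int) (out : Bool) : Prop := out = verifica_coluna_alt i j
instance (i : Int) (j : Int) (out : Bool) : Decidable (Spec_verifica_coluna i j out) := by unfold Spec_verifica_coluna; infer_instance

-- ===== CLAIM (what is proved, stated in full; the proofs are below) =====
def Claim_equal_verifica_coluna : Prop := ∀ (i : Int) (j : Int), Dom_verifica_coluna i j → Spec_verifica_coluna i j (verifica_coluna i j)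

-- ===== LEMMAS AND PROOFS =====

-- Python's 'if …: return True' inside a loop, as a Bool disjunction
theorem ite_true_or (p : Prop) [Decidable p] (b : Bool) :
    (if p then true else b) = (decide p || b) := by
  split_ifs with h <;> simp [h]

-- the inner counting loop counts the elements equal to i or to j
theorem fold_eq_countP (i j : Int) (l : List Int) (a : Int) :
    l.foldl (fun c nmr => if nmr = i ∨ nmr = j then c + 1 else c) a
      = a + l.countP (fun n => decide (n = i ∨ n = j)) := by
  induction l generalizing a with
  | nil => simp
  | cons x xs ih =>
    simp only [List.foldl_cons, List.countP_cons, ih]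
    by_cases h : x = i ∨ x = j <;> simp [h] <;> omega

theorem countP_pair (i j : Int) (hij : i ≠ j) (l : List Int) :
    l.countP (fun n => decide (n = i ∨ n = j)) = l.count i + l.count j := by
  induction l with
  | nil => simp
  | cons x xs ih =>
    simp only [List.countP_cons, List.count_cons, ih]
    by_cases hx1 : x = i <;> by_cases hx2 : x = j <;> simp [hx1, hx2, hij, Ne.symm hij] <;> omega

theorem countP_same (i : Int) (l : List Int) :
    l.countP (fun n => decide (n = i ∨ n = i)) = l.count i := by
  simp only [or_self, List.count]
  exact List.countP_congr (fun x _ => by simp)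

-- one column scan hits count = 2 exactly when i and j are two distinct cells of the column
theorem count_col (col : List Int) (c i j : Int) (hnd : col.Nodup)
    (hmem : ∀ x : Int, x ∈ col ↔ (0 ≤ x ∧ x ≤ 80 ∧ x % 9 = c)) :
    (List.foldl (fun cnt nmr => if nmr = i ∨ nmr = j then cnt + 1 else cnt) (0 : Int) col = 2)
    ↔ (i ≠ j ∧ 0 ≤ i ∧ i ≤ 80 ∧ 0 ≤ j ∧ j ≤ 80 ∧ i % 9 = c ∧ j % 9 = c) := by
  rw [fold_eq_countP]
  by_cases hij : i = j
  · subst hij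
    rw [countP_same]
    by_cases hi : i ∈ col
    · rw [List.count_eq_one_of_mem hnd hi]; simp
    · rw [List.count_eq_zero_of_not_mem hi]; simp
  · rw [countP_pair i j hij]
    by_cases hi : i ∈ col <;> by_cases hj : j ∈ col
    · have Hi := (hmem i).mp hi; have Hj := (hmem j).mp hj
      rw [List.count_eq_one_of_mem hnd hi, List.count_eq_one_of_mem hnd hj]
      constructor
      · intro _; exact ⟨hij, Hi.1, Hi.2.1, Hj.1, Hj.2.1, Hi.2.2, Hj.2.2⟩
      · intro _; norm_num
    · rw [List.count_eq_one_of_mem hnd hi, List.count_eq_zero_of_not_mem hj]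
      constructor
      · intro h2; omega
      · rintro ⟨-, -, -, hj0, hj80, -, hjm⟩
        exact absurd ((hmem j).mpr ⟨hj0, hj80, hjm⟩) hj
    · rw [List.count_eq_zero_of_not_mem hi, List.count_eq_one_of_mem hnd hj]
      constructor
      · intro h2; omega
      · rintro ⟨-, hi0, hi80, -, -, him, -⟩
        exact absurd ((hmem i).mpr ⟨hi0, hi80, him⟩) hi
    · rw [List.count_eq_zero_of_not_mem hi, List.count_eq_zero_of_not_mem hj]
      constructor
      · intro h2; omega
      · rintro ⟨-, hi0, hi80, -, -, him, -⟩
        exact absurd ((hmem i).mpr ⟨hi0, hi80, him⟩) hi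

-- the nine literal columns are exactly the residue classes mod 9 inside 0..80
theorem mem_col0 : ∀ x : Int, x ∈ ([0, 9, 18, 27, 36, 45, 54, 63, 72] : List Int) ↔ (0 ≤ x ∧ x ≤ 80 ∧ x % 9 = 0) := by
  intro x; simp only [List.mem_cons, List.not_mem_nil, or_false]; omega

theorem mem_col1 : ∀ x : Int, x ∈ ([1, 10, 19, 28, 37, 46, 55, 64, 73] : List Int) ↔ (0 ≤ x ∧ x ≤ 80 ∧ x % 9 = 1) := by
  intro x; simp only [List.mem_cons, List.not_mem_nil, or_false]; omega

theorem mem_col2 : ∀ x : Int, x ∈ ([2, 11, 20, 29, 38, 47, 56, 65, 74] : List Int) ↔ (0 ≤ x ∧ x ≤ 80 ∧ x % 9 = 2) := by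
  intro x; simp only [List.mem_cons, List.not_mem_nil, or_false]; omega

theorem mem_col3 : ∀ x : Int, x ∈ ([3, 12, 21, 30, 39, 48, 57, 66, 75] : List Int) ↔ (0 ≤ x ∧ x ≤ 80 ∧ x % 9 = 3) := by
  intro x; simp only [List.mem_cons, List.not_mem_nil, or_false]; omega

theorem mem_col4 : ∀ x : Int, x ∈ ([4, 13, 22, 31, 40, 49, 58, 67, 76] : List Int) ↔ (0 ≤ x ∧ x ≤ 80 ∧ x % 9 = 4) := by
  intro x; simp only [List.mem_cons, List.not_mem_nil, or_false]; omega

theorem mem_col5 : ∀ x : Int, x ∈ ([5, 14, 23, 32, 41, 50, 59, 68, 77] : List Int) ↔ (0 ≤ x ∧ x ≤ 80 ∧ x % 9 = 5) := by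
  intro x; simp only [List.mem_cons, List.not_mem_nil, or_false]; omega

theorem mem_col6 : ∀ x : Int, x ∈ ([6, 15, 24, 33, 42, 51, 60, 69, 78] : List Int) ↔ (0 ≤ x ∧ x ≤ 80 ∧ x % 9 = 6) := by
  intro x; simp only [List.mem_cons, List.not_mem_nil, or_false]; omega

theorem mem_col7 : ∀ x : Int, x ∈ ([7, 16, 25, 34, 43, 52, 61, 70, 79] : List Int) ↔ (0 ≤ x ∧ x ≤ 80 ∧ x % 9 = 7) := by
  intro x; simp only [List.mem_cons, List.not_mem_nil, or_false]; omega

theorem mem_col8 : ∀ x : Int, x ∈ ([8, 17, 26, 35, 44, 53, 62, 71, 80] : List Int) ↔ (0 ≤ x ∧ x ≤ 80 ∧ x % 9 = 8) := by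
  intro x; simp only [List.mem_cons, List.not_mem_nil, or_false]; omega

theorem verifica_coluna_eq_alt (i j : Int) : verifica_coluna i j = verifica_coluna_alt i j := by
  rw [Bool.eq_iff_iff]
  simp only [verifica_coluna, COLUNAS, vcLoop, ite_true_or, verifica_coluna_alt,
    Bool.or_eq_true, decide_eq_true_eq, Bool.false_eq_true, or_false,
    PySem.Int.mod_eq_emod_of_pos (a := i) (show (0:Int) < 9 by norm_num),
    PySem.Int.mod_eq_emod_of_pos (a := j) (show (0:Int) < 9 by norm_num)]
  rw [count_col [0, 9, 18, 27, 36, 45, 54, 63, 72] 0 i j (by decide) mem_col0]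
  rw [count_col [1, 10, 19, 28, 37, 46, 55, 64, 73] 1 i j (by decide) mem_col1]
  rw [count_col [2, 11, 20, 29, 38, 47, 56, 65, 74] 2 i j (by decide) mem_col2]
  rw [count_col [3, 12, 21, 30, 39, 48, 57, 66, 75] 3 i j (by decide) mem_col3]
  rw [count_col [4, 13, 22, 31, 40, 49, 58, 67, 76] 4 i j (by decide) mem_col4]
  rw [count_col [5, 14, 23, 32, 41, 50, 59, 68, 77] 5 i j (by decide) mem_col5]
  rw [count_col [6, 15, 24, 33, 42, 51, 60, 69, 78] 6 i j (by decide) mem_col6]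
  rw [count_col [7, 16, 25, 34, 43, 52, 61, 70, 79] 7 i j (by decide) mem_col7]
  rw [count_col [8, 17, 26, 35, 44, 53, 62, 71, 80] 8 i j (by decide) mem_col8]
  constructor
  · rintro (h|h|h|h|h|h|h|h|h) <;> omega
  · intro h
    have h9 : i % 9 = 0 ∨ i % 9 = 1 ∨ i % 9 = 2 ∨ i % 9 = 3 ∨ i % 9 = 4 ∨ i % 9 = 5 ∨ i % 9 = 6 ∨ i % 9 = 7 ∨ i % 9 = 8 := by omega
    rcases h9 with h9|h9|h9|h9|h9|h9|h9|h9|h9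
    · exact Or.inl ⟨h.1, h.2.1, h.2.2.1, h.2.2.2.1, h.2.2.2.2.1, h9, by omega⟩
    · exact Or.inr (Or.inl ⟨h.1, h.2.1, h.2.2.1, h.2.2.2.1, h.2.2.2.2.1, h9, by omega⟩)
    · exact Or.inr (Or.inr (Or.inl ⟨h.1, h.2.1, h.2.2.1, h.2.2.2.1, h.2.2.2.2.1, h9, by omega⟩))
    · exact Or.inr (Or.inr (Or.inr (Or.inl ⟨h.1, h.2.1, h.2.2.1, h.2.2.2.1, h.2.2.2.2.1, h9, by omega⟩)))
    · exact Or.inr (Or.inr (Or.inr (Or.inr (Or.inl ⟨h.1, h.2.1, h.2.2.1, h.2.2.2.1, h.2.2.2.2.1, h9, by omega⟩))))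
    · exact Or.inr (Or.inr (Or.inr (Or.inr (Or.inr (Or.inl ⟨h.1, h.2.1, h.2.2.1, h.2.2.2.1, h.2.2.2.2.1, h9, by omega⟩)))))
    · exact Or.inr (Or.inr (Or.inr (Or.inr (Or.inr (Or.inr (Or.inl ⟨h.1, h.2.1, h.2.2.1, h.2.2.2.1, h.2.2.2.2.1, h9, by omega⟩))))))
    · exact Or.inr (Or.inr (Or.inr (Or.inr (Or.inr (Or.inr (Or.inr (Or.inl ⟨h.1, h.2.1, h.2.2.1, h.2.2.2.1, h.2.2.2.2.1, h9, by omega⟩)))))))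
    · exact Or.inr (Or.inr (Or.inr (Or.inr (Or.inr (Or.inr (Or.inr (Or.inr (⟨h.1, h.2.1, h.2.2.1, h.2.2.2.1, h.2.2.2.2.1, h9, by omega⟩))))))))

-- ===== VERDICT (by name: the statement is the Claim_ definition above) =====
theorem verifica_coluna_spec : Claim_equal_verifica_coluna := by
  intro i j _
  unfold Spec_verifica_coluna
  exact verifica_coluna_eq_alt i j
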